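-- pv_equiv track=rewrite | github.com/fionavatar/cuvilliez-project-se | src/negatif_compressor.py | nbBlocsOverflow
-- ===== SOURCE A (Python) =====
-- def nbBlocsOverflow(k1, nbOF):
--     """Calcule le nombre exact de blocs de 32 bits nécessaires pour stocker nbOF entiers
--        de k1 bits chacun, avec padding à la fin de chaque bloc."""
--     bits_used = 0
--     blocs = 1 if nbOF > 0 else 0
--     for _ in range(nbOF):
--         if bits_used + k1 > 32:
--             blocs += 1
--             bits_used = 0
--         bits_used += k1
--     return blocs
-- ===== SOURCE B (Python) =====
-- def nbBlocsOverflow(k1, nbOF):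
--     # Closed form: O(1) instead of A's O(nbOF) loop.
--     if nbOF <= 0:
--         return 0
--     if k1 <= 0:
--         return 1
--     if k1 > 32:
--         # the opening block plus one fresh block per oversized integer
--         return nbOF + 1
--     cap = 32 // k1           # integers fitting in one 32-bit block
--     return -(-nbOF // cap)   # ceil(nbOF / cap)
-- ===== Notes on version B (the rewrite author's own statement) =====
-- stated objective: faster
-- what changed: Replaced A's per-integer simulation loop with a closed form: 0 for nbOF<=0, 1 for k1<=0, nbOF+1 for k1>32, else ceil(nbOF / (32//k1)).
import Mathlib
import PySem

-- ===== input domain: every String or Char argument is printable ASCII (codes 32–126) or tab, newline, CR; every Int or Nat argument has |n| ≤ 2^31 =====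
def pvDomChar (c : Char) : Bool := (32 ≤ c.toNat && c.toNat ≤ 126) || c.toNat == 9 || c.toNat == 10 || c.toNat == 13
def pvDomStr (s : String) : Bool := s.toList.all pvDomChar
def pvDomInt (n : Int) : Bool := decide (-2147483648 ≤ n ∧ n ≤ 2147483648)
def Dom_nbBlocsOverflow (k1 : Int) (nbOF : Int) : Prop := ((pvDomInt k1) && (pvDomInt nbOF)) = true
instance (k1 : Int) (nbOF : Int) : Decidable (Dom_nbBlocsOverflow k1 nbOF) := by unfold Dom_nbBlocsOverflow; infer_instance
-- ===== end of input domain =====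

-- B replaces A's per-integer simulation loop by an O(1) closed form (ceiling division).

-- ===== PORT A =====
-- loop body of A: update (bits_used, blocs) for one integer
def pvStepA (k1 : Int) (st : Int × Int) (_i : Int) : Int × Int :=
  if st.1 + k1 > 32 then (0 + k1, st.2 + 1) else (st.1 + k1, st.2)

def nbBlocsOverflow (k1 : Int) (nbOF : Int) : Int :=
  let blocs : Int := if nbOF > 0 then 1 else 0
  ((PySem.List.pyRange 0 nbOF 1).foldl (pvStepA k1) (0, blocs)).2

-- ===== PORT B =====
def nbBlocsOverflow_alt (k1 : Int) (nbOF : Int) : Int :=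
  if nbOF ≤ 0 then 0
  else if k1 ≤ 0 then 1
  else if k1 > 32 then nbOF + 1
  else -(PySem.Int.floordiv (-nbOF) (PySem.Int.floordiv 32 k1))

-- ===== PRECONDITION & SPEC =====
def Spec_nbBlocsOverflow (k1 : Int) (nbOF : Int) (out : Int) : Prop := out = nbBlocsOverflow_alt k1 nbOF
instance (k1 : Int) (nbOF : Int) (out : Int) : Decidable (Spec_nbBlocsOverflow k1 nbOF out) := by unfold Spec_nbBlocsOverflow; infer_instance

-- ===== CLAIM (what is proved, stated in full; the proofs are below) =====
def Claim_equal_nbBlocsOverflow : Prop := ∀ (k1 : Int) (nbOF : Int), Dom_nbBlocsOverflow k1 nbOF → Spec_nbBlocsOverflow k1 nbOF (nbBlocsOverflow k1 nbOF)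

-- ===== LEMMAS AND PROOFS =====

-- peel the last iteration off the loop
lemma pv_fold_succ (k1 : Int) (b : Int) (hb : 0 ≤ b) (init : Int × Int) :
    (PySem.List.pyRange 0 (b + 1) 1).foldl (pvStepA k1) init
      = pvStepA k1 ((PySem.List.pyRange 0 b 1).foldl (pvStepA k1) init) b := by
  rw [PySem.List.pyRange_one_succ_right hb]
  simp [List.foldl_append]

-- k1 ≤ 0: the if never fires, bits_used = n*k1
lemma pv_loop_nonpos (k1 : Int) (hk : k1 ≤ 0) (b0 : Int) :
    ∀ n : Nat, (PySem.List.pyRange 0 (n : Int) 1).foldl (pvStepA k1) (0, b0)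
      = ((n : Int) * k1, b0) := by
  intro n
  induction n with
  | zero => simp [PySem.List.pyRange_one_eq_nil]
  | succ m ih =>
      push_cast
      rw [pv_fold_succ k1 (m : Int) (Int.natCast_nonneg m), ih]
      have hmk : (m : Int) * k1 ≤ 0 :=
        mul_nonpos_iff.mpr (Or.inl ⟨Int.natCast_nonneg m, hk⟩)
      simp only [pvStepA]
      rw [if_neg (by omega), Prod.mk.injEq]
      exact ⟨by ring, rfl⟩

-- k1 > 32: the if fires every iteration
lemma pv_loop_big (k1 : Int) (hk : 32 < k1) (b0 : Int) :
    ∀ n : Nat, (PySem.List.pyRange 0 ((n : Int) + 1) 1).foldl (pvStepA k1) (0, b0)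
      = (k1, b0 + (n : Int) + 1) := by
  intro n
  induction n with
  | zero =>
      push_cast
      norm_num [PySem.List.pyRange_one, pvStepA]
      omega
  | succ m ih =>
      push_cast
      rw [pv_fold_succ k1 ((m : Int) + 1) (by positivity), ih]
      simp only [pvStepA]
      rw [if_pos (by omega), Prod.mk.injEq]
      exact ⟨by omega, by ring⟩

-- 1 ≤ k1 ≤ 32: after n+1 integers, state is (r*k1, b) with n+1 = (b-1)*cap + r, 1 ≤ r ≤ cap
lemma pv_loop_mid (k1 cap : Int) (hk : 1 ≤ k1) (hc1 : cap * k1 ≤ 32) (hc2 : 32 < (cap + 1) * k1)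
    (hcap : 1 ≤ cap) :
    ∀ n : Nat, ∃ b r : Int, 1 ≤ r ∧ r ≤ cap ∧ (n : Int) + 1 = (b - 1) * cap + r ∧
      (PySem.List.pyRange 0 ((n : Int) + 1) 1).foldl (pvStepA k1) (0, 1) = (r * k1, b) := by
  intro n
  induction n with
  | zero =>
      refine ⟨1, 1, le_refl _, hcap, by norm_num, ?_⟩
      push_cast
      norm_num [PySem.List.pyRange_one, pvStepA]
      nlinarith
  | succ m ih =>
      obtain ⟨b, r, hr1, hr2, hsum, hfold⟩ := ih
      push_cast
      rw [pv_fold_succ k1 ((m : Int) + 1) (by positivity), hfold]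
      simp only [pvStepA]
      by_cases hrc : r = cap
      · subst hrc
        rw [if_pos (by nlinarith)]
        exact ⟨b + 1, 1, le_refl _, hcap, by linarith [hsum], by norm_num⟩
      · have hlt : r + 1 ≤ cap := by omega
        rw [if_neg (by nlinarith)]
        exact ⟨b, r + 1, by omega, hlt, by linarith [hsum],
          by rw [Prod.mk.injEq]; exact ⟨by ring, rfl⟩⟩

-- ===== VERDICT (by name: the statement is the Claim_ definition above) =====
theorem nbBlocsOverflow_spec : Claim_equal_nbBlocsOverflow := by
  intro k1 nbOF _
  unfold Spec_nbBlocsOverflow nbBlocsOverflow nbBlocsOverflow_alt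
  by_cases hn : nbOF ≤ 0
  · rw [PySem.List.pyRange_one_eq_nil hn]
    simp [hn, show ¬ nbOF > 0 by omega]
  · push_neg at hn
    obtain ⟨m, hm⟩ : ∃ m : Nat, nbOF = (m : Int) + 1 :=
      ⟨(nbOF - 1).toNat, by omega⟩
    simp only [hm, if_pos (by omega : (m : Int) + 1 > 0),
      if_neg (by omega : ¬ ((m : Int) + 1 ≤ 0))]
    by_cases hk0 : k1 ≤ 0
    · rw [show ((m : Int) + 1) = (((m + 1 : Nat) : Int)) by push_cast; ring,
        pv_loop_nonpos k1 hk0 1, if_pos hk0]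
    · push_neg at hk0
      by_cases hk32 : 32 < k1
      · rw [pv_loop_big k1 hk32 1, if_neg (by omega), if_pos hk32]
        show (1 : Int) + (m : Int) + 1 = (m : Int) + 1 + 1
        ring
      · push_neg at hk32
        set cap := PySem.Int.floordiv 32 k1 with hcapdef
        have hbr : cap * k1 ≤ 32 ∧ (32 : Int) < (cap + 1) * k1 :=
          (PySem.Int.floordiv_eq_iff_of_pos (by omega)).mp hcapdef.symm
        have hcap1 : 1 ≤ cap :=
          (PySem.Int.le_floordiv_iff_mul_le (by omega)).mpr (by omega)
        obtain ⟨b, r, hr1, hr2, hsum, hfold⟩ :=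
          pv_loop_mid k1 cap hk0 hbr.1 hbr.2 hcap1 m
        rw [hfold, if_neg (by omega), if_neg (by omega)]
        have : -(PySem.Int.floordiv (-((m : Int) + 1)) cap) = b := by
          rw [PySem.Int.neg_floordiv_neg_eq_iff_of_pos (by omega)]
          constructor <;> nlinarith
        rw [this]
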